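-- pv_equiv track=rewrite | github.com/urieliram/tc_uc2 | routines.py | time_off_row
-- ===== SOURCE A (Python) =====
-- def time_off_row(row, account):
--     Toff = [0 for x in range(len(row))]
--     for t in range(len(Toff)):
--         if row[t] == 0:
--             if  t == 0:
--                 Toff[t] = account + 1
--             else:
--                 Toff[t] = Toff[t-1] + 1
--     return(Toff)
-- ===== SOURCE B (Python) =====
-- def time_off_row(row, account):
--     # Run-based: split the row into maximal runs of equal values, then fill
--     # each run at once: a zero-run gets an increasing streak (offset by
--     # `account` only for the run starting at index 0), a nonzero-run gets zeros.
--     out = []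
--     n = len(row)
--     i = 0
--     while i < n:
--         x = row[i]
--         j = i + 1
--         while j < n and row[j] == x:
--             j += 1
--         L = j - i
--         if x == 0:
--             base = account if i == 0 else 0
--             out.extend(base + 1 + k for k in range(L))
--         else:
--             out.extend([0] * L)
--         i = j
--     return out
-- ===== Notes on version B (the rewrite author's own statement) =====
-- stated objective: alternative
-- what changed: B splits the row into maximal runs of equal values and fills each run in one shot (arithmetic streak for a zero-run, zeros otherwise), instead of A's element-by-element pass chaining through Toff[t-1].
import Mathlib
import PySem

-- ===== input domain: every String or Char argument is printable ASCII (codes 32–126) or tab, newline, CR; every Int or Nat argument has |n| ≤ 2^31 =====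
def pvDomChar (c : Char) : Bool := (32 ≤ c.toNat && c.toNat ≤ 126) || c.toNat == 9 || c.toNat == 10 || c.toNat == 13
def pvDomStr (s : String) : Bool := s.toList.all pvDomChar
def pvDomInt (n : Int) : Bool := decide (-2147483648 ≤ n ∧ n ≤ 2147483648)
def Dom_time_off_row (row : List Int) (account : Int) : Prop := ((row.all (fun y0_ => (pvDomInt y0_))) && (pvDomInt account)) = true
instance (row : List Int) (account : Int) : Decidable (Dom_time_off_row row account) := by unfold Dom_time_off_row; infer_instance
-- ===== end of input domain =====

-- B fills the row run-by-run (maximal equal runs) instead of A's element-wise pass chaining Toff[t-1]; alternative decomposition, same cost.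


-- ===== PORT A =====
-- A's loop writes each Toff[t] from row[t] and Toff[t-1]; the loop is the
-- standard recursion carrying `prev` = the value just written (cells not
-- written keep their initial 0, which is the `else 0` branch).
def timeOffGoA (account : Int) : List Int → Nat → Int → List Int
  | [], _, _ => []
  | x :: xs, t, prev =>
    let v : Int := if x = 0 then (if t = 0 then account + 1 else prev + 1) else 0
    v :: timeOffGoA account xs (t + 1) v

def time_off_row (row : List Int) (account : Int) : List Int :=
  timeOffGoA account row 0 0

-- ===== PORT B =====
-- B's outer while loop: take the maximal run of the head value, emit its
-- chunk, recurse on the remainder with the updated start index i.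
def runFillB (account : Int) : List Int → Nat → List Int
  | [], _ => []
  | x :: xs, i =>
    let ys := xs.takeWhile (fun y => y == x)
    let L := 1 + ys.length
    let chunk : List Int :=
      if x = 0 then
        let base : Int := if i = 0 then account else 0
        (List.range L).map (fun j : Nat => base + 1 + (j : Int))
      else List.replicate L 0
    chunk ++ runFillB account (xs.dropWhile (fun y => y == x)) (i + L)
  termination_by l _ => l.length
  decreasing_by
    simpa using Nat.lt_succ_of_le (List.length_dropWhile_le _ _)

def time_off_row_alt (row : List Int) (account : Int) : List Int :=
  runFillB account row 0

-- ===== PRECONDITION & SPEC =====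
def Spec_time_off_row (row : List Int) (account : Int) (out : List Int) : Prop := out = time_off_row_alt row account
instance (row : List Int) (account : Int) (out : List Int) : Decidable (Spec_time_off_row row account out) := by unfold Spec_time_off_row; infer_instance

-- ===== CLAIM (what is proved, stated in full; the proofs are below) =====
def Claim_equal_time_off_row : Prop := ∀ (row : List Int) (account : Int), Dom_time_off_row row account → Spec_time_off_row row account (time_off_row row account)

-- ===== LEMMAS AND PROOFS =====

-- Proof-side simplification of A's loop: after the first step, the `t = 0`
-- test never fires, so the loop is just "carry the previous value".
def gHelp : List Int → Int → List Int
  | [], _ => []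
  | x :: xs, p =>
    let v : Int := if x = 0 then p + 1 else 0
    v :: gHelp xs v

theorem goA_eq_g (account : Int) :
    ∀ (row : List Int) (t : Nat) (prev : Int),
      timeOffGoA account row t prev = gHelp row (if t = 0 then account else prev) := by
  intro row
  induction row with
  | nil => intro t prev; rfl
  | cons x xs ih =>
    intro t prev
    by_cases hx : x = 0 <;> by_cases ht : t = 0 <;>
      simp [timeOffGoA, gHelp, hx, ht, ih (t + 1), ih 1]

theorem range_streak (p : Int) (n : Nat) :
    (List.range (n + 1)).map (fun j : Nat => p + 1 + (j : Int)) =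
      (p + 1) :: (List.range n).map (fun j : Nat => (p + 1) + 1 + (j : Int)) := by
  rw [List.range_succ_eq_map, List.map_cons, List.map_map]
  refine congrArg₂ _ (by push_cast; ring) ?_
  apply List.map_congr_left; intro j _
  simp [Function.comp]
  ring

-- gHelp over a run of zeros: an arithmetic streak starting at p + 1.
theorem g_zero_run :
    ∀ (ys zs : List Int) (p : Int), (∀ y ∈ ys, y = 0) →
      gHelp (ys ++ zs) p =
        ((List.range ys.length).map (fun j : Nat => p + 1 + (j : Int))) ++ gHelp zs (p + ys.length) := by
  intro ys
  induction ys with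
  | nil => intro zs p _; simp
  | cons y ys ih =>
    intro zs p h
    have hy : y = 0 := h y (by simp)
    have hys : ∀ y' ∈ ys, y' = 0 := fun y' hy' => h y' (by simp [hy'])
    subst hy
    have h1 : gHelp ((0 : Int) :: (ys ++ zs)) p = (p + 1) :: gHelp (ys ++ zs) (p + 1) := by
      simp [gHelp]
    rw [List.cons_append, h1, ih zs (p + 1) hys, List.length_cons, range_streak,
      List.cons_append]
    refine congrArg _ (congrArg₂ _ rfl (congrArg _ ?_))
    push_cast; ring

-- gHelp over a nonempty run of nonzeros: zeros, and the carried value resets to 0.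
theorem g_nonzero_run :
    ∀ (ys zs : List Int) (p : Int), (∀ y ∈ ys, y ≠ 0) →
      gHelp (ys ++ zs) p =
        List.replicate ys.length 0 ++ gHelp zs (if ys.isEmpty then p else 0) := by
  intro ys
  induction ys with
  | nil => intro zs p _; simp
  | cons y ys ih =>
    intro zs p h
    have hy : y ≠ 0 := h y (by simp)
    have hys : ∀ y' ∈ ys, y' ≠ 0 := fun y' hy' => h y' (by simp [hy'])
    have h1 : gHelp (y :: (ys ++ zs)) p = 0 :: gHelp (ys ++ zs) 0 := by
      simp [gHelp, hy]
    rw [List.cons_append, h1, ih zs 0 hys]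
    cases ys <;> simp [List.replicate_succ]

-- Main lemma: gHelp agrees with B's run filler, under the invariant that the
-- carried value p equals the base B will use for the next run.
theorem g_eq_runFill (account : Int) :
    ∀ (n : Nat) (row : List Int) (i : Nat) (p : Int), row.length ≤ n →
      (if i = 0 then p = account
       else (p = 0 ∨ ∀ h ∈ row.head?, h ≠ (0 : Int))) →
      gHelp row p = runFillB account row i := by
  intro n
  induction n with
  | zero =>
    intro row i p hlen _
    have : row = [] := List.eq_nil_of_length_eq_zero (Nat.le_zero.mp hlen)
    subst this; simp [gHelp, runFillB]
  | succ n ih =>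
    intro row i p hlen hinv
    cases row with
    | nil => simp [gHelp, runFillB]
    | cons x xs =>
      have hsplit : x :: xs = (x :: xs.takeWhile (fun y => y == x)) ++ xs.dropWhile (fun y => y == x) := by
        simp [List.takeWhile_append_dropWhile]
      have hL : (x :: xs.takeWhile (fun y => y == x)).length = 1 + (xs.takeWhile (fun y => y == x)).length := by
        simp [Nat.add_comm]
      have hdroplen : (xs.dropWhile (fun y => y == x)).length ≤ n := by
        have := List.length_dropWhile_le (fun y => y == x) xs
        simpa using Nat.le_trans this (Nat.le_of_succ_le_succ (by simpa using hlen))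
      have hdrophead : ∀ h ∈ (xs.dropWhile (fun y => y == x)).head?, h ≠ x := by
        intro h hh
        have hnp := List.head?_dropWhile_not (fun y => y == x) xs
        intro hc
        cases hmem : (xs.dropWhile (fun y => y == x)).head? with
        | none => simp [hmem] at hh
        | some a =>
          rw [hmem] at hh hnp
          simp at hh; subst hh
          simp [hc] at hnp
      by_cases hx : x = 0
      · -- zero run
        have hall : ∀ y ∈ x :: xs.takeWhile (fun y => y == x), y = 0 := by
          intro y hy
          rcases List.mem_cons.mp hy with h | h
          · exact h ▸ hx
          · have := List.mem_takeWhile_imp h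
            simp at this; exact this ▸ hx
        have hbase : p = (if i = 0 then account else 0) := by
          split_ifs with hi
          · simpa [hi] using hinv
          · rw [if_neg hi] at hinv
            rcases hinv with h | h
            · exact h
            · exact absurd hx (h x rfl)
        have hih := ih (xs.dropWhile (fun y => y == x))
          (i + (1 + (xs.takeWhile (fun y => y == x)).length))
          (p + ((x :: xs.takeWhile (fun y => y == x)).length : Int)) hdroplen
          (by
            rw [if_neg (by omega)]
            right
            intro h hh; exact hx ▸ hdrophead h hh)
        conv_lhs => rw [hsplit]
        rw [g_zero_run _ _ p hall, hih]
        simp only [runFillB, if_pos hx]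
        congr 1
        rw [hL, ← hbase]
      · -- nonzero run
        have hall : ∀ y ∈ x :: xs.takeWhile (fun y => y == x), y ≠ 0 := by
          intro y hy
          rcases List.mem_cons.mp hy with h | h
          · exact h ▸ hx
          · have := List.mem_takeWhile_imp h
            simp at this; exact this ▸ hx
        have hih := ih (xs.dropWhile (fun y => y == x))
          (i + (1 + (xs.takeWhile (fun y => y == x)).length)) 0 hdroplen
          (by rw [if_neg (by omega)]; left; rfl)
        conv_lhs => rw [hsplit]
        rw [g_nonzero_run _ _ p hall]
        simp only [List.isEmpty_cons, Bool.false_eq_true, if_false]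
        rw [hih]
        simp only [runFillB, if_neg hx]
        rw [hL]

-- ===== VERDICT (by name: the statement is the Claim_ definition above) =====
theorem time_off_row_spec : Claim_equal_time_off_row := by
  intro row account _
  unfold Spec_time_off_row time_off_row time_off_row_alt
  rw [goA_eq_g account row 0 0, if_pos rfl]
  exact g_eq_runFill account row.length row 0 account le_rfl (by simp)
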